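-- pv_equiv track=rewrite | github.com/dev-yeon/CodingTest | Python/CodeTest/00.시간복잡도/BaekTest06.py | MenOfPassion
-- ===== SOURCE A (Python) =====
-- def MenOfPassion(A):
--   sum = 0
--   n = len(A)
--   for i in range(1, n-1): # O (ğ‘›) (n-1)
--     for j in range(i+1, n): # O (ğ‘›)  n/2
--       for k in range(j+1, n): # O (ğ‘›)  n
--         sum +=  A[i] * A[j] * A[k];
--   return sum
-- ===== SOURCE B (Python) =====
-- def MenOfPassion(A):
--     # One pass over A[1:] maintaining elementary symmetric sums e1, e2, e3.
--     e1 = e2 = e3 = 0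
--     for x in A[1:]:
--         e3 += e2 * x
--         e2 += e1 * x
--         e1 += x
--     return e3
-- ===== Notes on version B (the rewrite author's own statement) =====
-- stated objective: faster
-- what changed: Replaced the O(n^3) triple nested index loop by a single pass over A[1:] that maintains the elementary symmetric sums e1, e2, e3 (Newton-style DP), returning e3.
import Mathlib
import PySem

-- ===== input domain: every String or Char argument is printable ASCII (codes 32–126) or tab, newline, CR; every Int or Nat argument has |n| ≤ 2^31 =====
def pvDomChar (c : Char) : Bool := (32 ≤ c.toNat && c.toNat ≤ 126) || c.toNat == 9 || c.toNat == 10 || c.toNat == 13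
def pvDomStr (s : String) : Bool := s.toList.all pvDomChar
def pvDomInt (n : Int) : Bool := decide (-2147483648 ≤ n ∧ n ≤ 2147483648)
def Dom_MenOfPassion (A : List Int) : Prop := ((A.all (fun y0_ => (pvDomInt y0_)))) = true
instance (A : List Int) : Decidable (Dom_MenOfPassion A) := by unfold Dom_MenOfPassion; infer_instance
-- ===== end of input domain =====

-- B replaces A's O(n^3) triple-index loop by ONE pass over A[1:] maintaining the
-- elementary symmetric sums e1,e2,e3 (objective: faster, asymptotic O(n)).

-- ===== PORT A =====
-- Triple nested for over ranges; A[i] is always in range here, so pyGetD is exact.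
def MenOfPassion (A : List Int) : Int :=
  let n : Int := A.length
  (PySem.List.pyRange 1 (n - 1) 1).foldl (fun s i =>
    (PySem.List.pyRange (i + 1) n 1).foldl (fun s j =>
      (PySem.List.pyRange (j + 1) n 1).foldl (fun s k =>
        s + PySem.List.pyGetD A i 0 * PySem.List.pyGetD A j 0 * PySem.List.pyGetD A k 0) s) s) 0

-- ===== PORT B =====
def MenOfPassion_alt (A : List Int) : Int :=
  ((A.drop 1).foldl
    (fun (e : Int × Int × Int) x => (e.1 + x, e.2.1 + e.1 * x, e.2.2 + e.2.1 * x))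
    (0, 0, 0)).2.2

-- ===== PRECONDITION & SPEC =====
def Spec_MenOfPassion (A : List Int) (out : Int) : Prop := out = MenOfPassion_alt A
instance (A : List Int) (out : Int) : Decidable (Spec_MenOfPassion A out) := by unfold Spec_MenOfPassion; infer_instance

-- ===== CLAIM (what is proved, stated in full; the proofs are below) =====
def Claim_equal_MenOfPassion : Prop := ∀ (A : List Int), Dom_MenOfPassion A → Spec_MenOfPassion A (MenOfPassion A)

-- ===== LEMMAS AND PROOFS =====

-- power-free elementary symmetric sums, structurally
def pvS1 : List Int → Int
  | [] => 0
  | x :: t => x + pvS1 t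

def pvS2 : List Int → Int
  | [] => 0
  | x :: t => x * pvS1 t + pvS2 t

def pvS3 : List Int → Int
  | [] => 0
  | x :: t => x * pvS2 t + pvS3 t

lemma pv_drop_all (L : List Int) (a : Int) (h : (L.length : Int) ≤ a) :
    L.drop a.toNat = [] := by
  apply List.drop_eq_nil_of_le
  omega

lemma pv_inner (L : List Int) (c : Int) :
    ∀ (d : Nat) (a : Int), 0 ≤ a → a + d = L.length → ∀ s : Int,
      (PySem.List.pyRange a (L.length : Int) 1).foldl
        (fun s k => s + c * PySem.List.pyGetD L k 0) s
      = s + c * pvS1 (L.drop a.toNat) := by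
  intro d
  induction d with
  | zero =>
    intro a ha hlen s
    rw [PySem.List.pyRange_one_eq_nil (by omega), pv_drop_all L a (by omega)]
    simp [pvS1]
  | succ d ih =>
    intro a ha hlen s
    have hlt : a < (L.length : Int) := by omega
    have hna : a.toNat < L.length := by omega
    rw [PySem.List.pyRange_one_cons hlt]
    simp only [List.foldl_cons]
    rw [ih (a + 1) (by omega) (by omega)]
    rw [List.drop_eq_getElem_cons hna]
    have h1 : (a + 1).toNat = a.toNat + 1 := by omega
    rw [PySem.List.pyGetD_eq_getElem L (i := a) 0 ha hlt, h1]
    simp [pvS1]; ring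

lemma pv_mid (L : List Int) (c : Int) :
    ∀ (d : Nat) (a : Int), 0 ≤ a → a + d = L.length → ∀ s : Int,
      (PySem.List.pyRange a (L.length : Int) 1).foldl
        (fun s j =>
          (PySem.List.pyRange (j + 1) (L.length : Int) 1).foldl
            (fun s k => s + c * PySem.List.pyGetD L j 0 * PySem.List.pyGetD L k 0) s) s
      = s + c * pvS2 (L.drop a.toNat) := by
  intro d
  induction d with
  | zero =>
    intro a ha hlen s
    rw [PySem.List.pyRange_one_eq_nil (by omega), pv_drop_all L a (by omega)]
    simp [pvS2]
  | succ d ih =>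
    intro a ha hlen s
    have hlt : a < (L.length : Int) := by omega
    have hna : a.toNat < L.length := by omega
    rw [PySem.List.pyRange_one_cons hlt]
    simp only [List.foldl_cons]
    rw [pv_inner L (c * PySem.List.pyGetD L a 0) d (a + 1) (by omega) (by omega)]
    rw [ih (a + 1) (by omega) (by omega)]
    rw [List.drop_eq_getElem_cons hna]
    have h1 : (a + 1).toNat = a.toNat + 1 := by omega
    rw [PySem.List.pyGetD_eq_getElem L (i := a) 0 ha hlt, h1]
    simp [pvS2]; ring

lemma pv_outer (L : List Int) :
    ∀ (d : Nat) (a : Int), 0 ≤ a → a + d = L.length → ∀ s : Int,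
      (PySem.List.pyRange a ((L.length : Int) - 1) 1).foldl
        (fun s i =>
          (PySem.List.pyRange (i + 1) (L.length : Int) 1).foldl
            (fun s j =>
              (PySem.List.pyRange (j + 1) (L.length : Int) 1).foldl
                (fun s k =>
                  s + PySem.List.pyGetD L i 0 * PySem.List.pyGetD L j 0 *
                    PySem.List.pyGetD L k 0) s) s) s
      = s + pvS3 (L.drop a.toNat) := by
  intro d
  induction d with
  | zero =>
    intro a ha hlen s
    rw [PySem.List.pyRange_one_eq_nil (by omega), pv_drop_all L a (by omega)]
    simp [pvS3]
  | succ d ih =>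
    intro a ha hlen s
    have hna : a.toNat < L.length := by omega
    by_cases hd : d = 0
    · -- a = length - 1: empty outer range, drop is a singleton, pvS3 = 0
      subst hd
      rw [PySem.List.pyRange_one_eq_nil (by omega)]
      have hdrop : L.drop a.toNat = [L[a.toNat]] := by
        rw [List.drop_eq_getElem_cons hna]
        have : L.drop (a.toNat + 1) = [] := List.drop_eq_nil_of_le (by omega)
        rw [this]
      rw [hdrop]
      simp [pvS3, pvS2, List.foldl_nil]
    · have hlt : a < (L.length : Int) - 1 := by omega
      rw [PySem.List.pyRange_one_cons hlt]
      simp only [List.foldl_cons]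
      rw [pv_mid L (PySem.List.pyGetD L a 0) d (a + 1) (by omega) (by omega)]
      rw [ih (a + 1) (by omega) (by omega)]
      rw [List.drop_eq_getElem_cons hna]
      have h1 : (a + 1).toNat = a.toNat + 1 := by omega
      rw [PySem.List.pyGetD_eq_getElem L (i := a) 0 (by omega) (by omega), h1]
      simp [pvS3]; ring

lemma pv_alt_fold (xs : List Int) :
    ∀ (a b c : Int),
      xs.foldl (fun (e : Int × Int × Int) x => (e.1 + x, e.2.1 + e.1 * x, e.2.2 + e.2.1 * x))
        (a, b, c)
      = (a + pvS1 xs, b + a * pvS1 xs + pvS2 xs,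
         c + b * pvS1 xs + a * pvS2 xs + pvS3 xs) := by
  induction xs with
  | nil => intro a b c; simp [pvS1, pvS2, pvS3]
  | cons x t ih =>
    intro a b c
    simp only [List.foldl_cons]
    rw [ih]
    simp [pvS1, pvS2, pvS3, Prod.ext_iff]
    refine ⟨by ring, by ring, by ring⟩

-- ===== VERDICT (by name: the statement is the Claim_ definition above) =====
theorem MenOfPassion_spec : Claim_equal_MenOfPassion := by
  intro A _
  unfold Spec_MenOfPassion MenOfPassion MenOfPassion_alt
  rw [pv_alt_fold (A.drop 1) 0 0 0]
  cases A with
  | nil => simp [PySem.List.pyRange, pvS1, pvS2, pvS3]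
  | cons x t =>
    have h := pv_outer (x :: t) t.length 1 (by omega) (by simp; omega) 0
    simp only at h
    rw [h]
    simp
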